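-- pv_equiv track=rewrite | github.com/aquarellian/adventofcode2018 | src/AoC2019/d13t2.py | update_field
-- ===== SOURCE A (Python) =====
-- def update_field(field, upd):
--     ball_x, base_x = None, None
--     score = 0
--     for ind, val in enumerate(upd):
--         rem = ind % 3
--         if rem == 0:
--             x = val
--         elif rem == 1:
--             y = val
--         elif rem == 2:
--             if x == -1 and y == 0:
--                 score = val
--             else:
--                 tile = ' ' if val == 0 else '#' if val == 1 else '*' if val == 2 else '_' if val == 3 else 'O' if val == 4 else 'WTF'
--                 if val == 4:
--                     ball_x = x
--                 elif val == 3: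
--                     base_x = x
--                 field[y] = field.get(y, {})
--                 field[y][x] = tile
--             x = None
--             y = None
--     if ball_x is None or base_x is None or ball_x == base_x:
--         return 0, score
--     elif ball_x > base_x:
--         return 1, score
--     elif ball_x < base_x:
--         return -1, score
-- ===== SOURCE B (Python) =====
-- def update_field(field, upd):
--     # Mutates `field` the same way A does; equivalence claim is about the return value.
--     triples = []
--     i = 0
--     while i + 3 <= len(upd):
--         triples.append((upd[i], upd[i + 1], upd[i + 2]))
--         i += 3
--     tiles = {0: ' ', 1: '#', 2: '*', 3: '_', 4: 'O'}
--     for x, y, val in triples: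
--         if not (x == -1 and y == 0):
--             field.setdefault(y, {})[x] = tiles.get(val, 'WTF')
--     score = next((v for x, y, v in reversed(triples) if x == -1 and y == 0), 0)
--     ball_x = next((x for x, y, v in reversed(triples)
--                    if not (x == -1 and y == 0) and v == 4), None)
--     base_x = next((x for x, y, v in reversed(triples)
--                    if not (x == -1 and y == 0) and v == 3), None)
--     if ball_x is None or base_x is None:
--         return 0, score
--     return (ball_x > base_x) - (ball_x < base_x), score
-- ===== Notes on version B (the rewrite author's own statement) =====
-- stated objective: simpler
-- what changed: Replaces A's per-element index-mod-3 state machine (carrying x/y across iterations) by chunking upd into complete triples and finding score, ball_x and base_x as the first matching triple of the reversed list, with the final move computed arithmetically as a sign.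
import Mathlib
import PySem

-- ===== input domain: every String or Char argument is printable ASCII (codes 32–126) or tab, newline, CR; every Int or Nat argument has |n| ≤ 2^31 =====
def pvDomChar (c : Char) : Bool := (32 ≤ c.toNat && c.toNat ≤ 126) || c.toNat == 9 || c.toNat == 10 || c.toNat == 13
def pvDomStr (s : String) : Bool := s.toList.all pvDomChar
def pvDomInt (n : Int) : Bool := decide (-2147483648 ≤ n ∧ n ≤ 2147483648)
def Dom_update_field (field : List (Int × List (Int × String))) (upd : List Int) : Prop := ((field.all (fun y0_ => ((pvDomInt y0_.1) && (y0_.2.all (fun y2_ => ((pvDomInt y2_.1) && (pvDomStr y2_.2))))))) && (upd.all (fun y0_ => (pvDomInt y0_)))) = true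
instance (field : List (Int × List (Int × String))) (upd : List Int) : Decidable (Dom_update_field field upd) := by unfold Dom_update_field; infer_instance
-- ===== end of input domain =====

-- B replaces A's per-element mod-3 state machine by chunking into complete triples and
-- reverse-searching for the last score/ball/base writes (objective: simpler).
-- Both Pythons mutate `field` in place identically; the equivalence proved is about the RETURN value.

-- ===== PORT A =====
-- A's `for ind, val in enumerate(upd)` loop: recursion over upd carrying the running index
-- and the loop state (ball_x, base_x, score, x, y, field); `.getD 0` on x/y only makes the
-- port total — at rem == 2 they are always `some` (set at rem 0/1), matching Python.
def pvLoopA (ball base : Option Int) (score : Int) (x y : Option Int)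
    (fld : PySem.Dict Int (PySem.Dict Int String)) (ind : Nat) :
    List Int → Option Int × Option Int × Int
  | [] => (ball, base, score)
  | val :: rest =>
    let rem := ind % 3
    if rem == 0 then
      pvLoopA ball base score (some val) y fld (ind + 1) rest
    else if rem == 1 then
      pvLoopA ball base score x (some val) fld (ind + 1) rest
    else
      if x.getD 0 == -1 && y.getD 0 == 0 then
        pvLoopA ball base val none none fld (ind + 1) rest
      else
        let tile : String :=
          if val == 0 then " " else if val == 1 then "#" else if val == 2 then "*"
          else if val == 3 then "_" else if val == 4 then "O" else "WTF"
        let ball' := if val == 4 then some (x.getD 0) else ball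
        let base' := if val == 3 then some (x.getD 0) else base
        let row := (fld.getD (y.getD 0) PySem.Dict.empty).insert (x.getD 0) tile
        pvLoopA ball' base' score none none (fld.insert (y.getD 0) row) (ind + 1) rest

def update_field (field : List (Int × List (Int × String))) (upd : List Int) : Int × Int :=
  let fld : PySem.Dict Int (PySem.Dict Int String) :=
    PySem.Dict.ofList (field.map (fun p => (p.1, PySem.Dict.ofList p.2)))
  match pvLoopA none none 0 none none fld 0 upd with
  | (ball_x, base_x, score) =>
    match ball_x, base_x with
    | some bx, some px =>
      if bx == px then (0, score)
      else if bx > px then (1, score) else (-1, score)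
    | _, _ => (0, score)

-- ===== PORT B =====
-- Source B's while-loop collecting complete triples (tail of upd indexed by i steps by 3).
def pvTriples : List Int → List (Int × Int × Int)
  | a :: b :: c :: rest => (a, b, c) :: pvTriples rest
  | _ => []

def pvIsScore (t : Int × Int × Int) : Bool := t.1 == -1 && t.2.1 == 0

def update_field_alt (field : List (Int × List (Int × String))) (upd : List Int) : Int × Int :=
  let ts := pvTriples upd
  let tiles : PySem.Dict Int String :=
    PySem.Dict.ofList [(0, " "), (1, "#"), (2, "*"), (3, "_"), (4, "O")]
  -- mirrors Source B's in-place mutation of `field`; the resulting dict is not part of the return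
  let _fld : PySem.Dict Int (PySem.Dict Int String) :=
    ts.foldl (fun fld t =>
        if pvIsScore t then fld
        else fld.insert t.2.1 ((fld.getD t.2.1 PySem.Dict.empty).insert t.1 (tiles.getD t.2.2 "WTF")))
      (PySem.Dict.ofList (field.map (fun p => (p.1, PySem.Dict.ofList p.2))))
  let score : Int :=
    match ts.reverse.find? pvIsScore with
    | some t => t.2.2
    | none => 0
  let ball_x : Option Int := (ts.reverse.find? (fun t => !pvIsScore t && t.2.2 == 4)).map (·.1)
  let base_x : Option Int := (ts.reverse.find? (fun t => !pvIsScore t && t.2.2 == 3)).map (·.1)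
  match ball_x with
  | none => (0, score)
  | some bx =>
    match base_x with
    | none => (0, score)
    | some px => ((if bx > px then 1 else 0) - (if bx < px then 1 else 0), score)

-- ===== PRECONDITION & SPEC =====
def Spec_update_field (field : List (Int × List (Int × String))) (upd : List Int) (out : Int × Int) : Prop := out = update_field_alt field upd
instance (field : List (Int × List (Int × String))) (upd : List Int) (out : Int × Int) : Decidable (Spec_update_field field upd out) := by unfold Spec_update_field; infer_instance

-- ===== CLAIM (what is proved, stated in full; the proofs are below) =====
def Claim_equal_update_field : Prop := ∀ (field : List (Int × List (Int × String))) (upd : List Int), Dom_update_field field upd → Spec_update_field field upd (update_field field upd)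

-- ===== LEMMAS AND PROOFS =====

-- last-write-wins fold = first match on the reversed list
theorem foldl_ite_update {α β : Type} (p : α → Bool) (g : α → β) :
    ∀ (l : List α) (s : β),
      l.foldl (fun acc t => if p t then g t else acc) s
        = ((l.reverse.find? p).map g).getD s := by
  intro l
  induction l with
  | nil => intro s; simp
  | cons a l ih =>
    intro s
    simp only [List.foldl_cons, List.reverse_cons, List.find?_append]
    rw [ih]
    cases h : l.reverse.find? p with
    | some t => simp
    | none => simp [List.find?]; by_cases hp : p a <;> simp [hp]

-- the mod-3 state machine over a triple-aligned index computes three independent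
-- last-write-wins folds over the complete triples
theorem loop_eq_folds :
    ∀ (upd : List Int) (k : Nat) (ball base : Option Int) (score : Int)
      (fld : PySem.Dict Int (PySem.Dict Int String)),
      pvLoopA ball base score none none fld (3 * k) upd
        = ((pvTriples upd).foldl
             (fun b t => if !pvIsScore t && t.2.2 == 4 then some t.1 else b) ball,
           (pvTriples upd).foldl
             (fun b t => if !pvIsScore t && t.2.2 == 3 then some t.1 else b) base,
           (pvTriples upd).foldl
             (fun s t => if pvIsScore t then t.2.2 else s) score) := by
  intro upd
  induction upd using pvTriples.induct with
  | case1 a b c rest ih =>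
    intro k ball base score fld
    have h0 : 3 * k % 3 = 0 := by omega
    have h1 : (3 * k + 1) % 3 = 1 := by omega
    have h2 : (3 * k + 1 + 1) % 3 = 2 := by omega
    have h3 : (3 * k + 1 + 1 + 1) = 3 * (k + 1) := by omega
    by_cases hsc : (a == -1 && b == 0) = true
    · obtain ⟨ha', hb'⟩ : a = -1 ∧ b = 0 := by simpa using hsc
      simp [pvLoopA, h0, h1, h2, h3, ih, pvTriples, pvIsScore, ha', hb']
    · simp only [Bool.not_eq_true] at hsc
      have hd : ¬a = -1 ∨ ¬b = 0 := by
        have := hsc; simp at this; tauto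
      have hns : ¬(a = -1 ∧ b = 0) := by tauto
      simp [pvLoopA, h0, h1, h2, h3, ih, pvTriples, pvIsScore, hsc, hd, hns]
  | case2 x h =>
    intro k ball base score fld
    match x with
    | [] => simp [pvLoopA, pvTriples]
    | [a] =>
      have ha : 3 * k % 3 = 0 := by omega
      simp [pvLoopA, ha, pvTriples]
    | [a, b] =>
      have ha : 3 * k % 3 = 0 := by omega
      have hb : (3 * k + 1) % 3 = 1 := by omega
      simp [pvLoopA, ha, hb, pvTriples]
    | a :: b :: c :: rest => exact absurd rfl (h a b c rest)

-- ===== VERDICT (by name: the statement is the Claim_ definition above) =====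
theorem update_field_spec : Claim_equal_update_field := by
  intro field upd _
  unfold Spec_update_field update_field update_field_alt
  dsimp only
  rw [loop_eq_folds upd 0 none none 0
    (PySem.Dict.ofList (field.map (fun p => (p.1, PySem.Dict.ofList p.2))))]
  rw [foldl_ite_update (fun t => !pvIsScore t && t.2.2 == 4) (fun t => some t.1),
      foldl_ite_update (fun t => !pvIsScore t && t.2.2 == 3) (fun t => some t.1),
      foldl_ite_update pvIsScore (fun t => t.2.2)]
  cases hb : (pvTriples upd).reverse.find? (fun t => !pvIsScore t && t.2.2 == 4) with
  | none =>
    cases hp : (pvTriples upd).reverse.find? (fun t => !pvIsScore t && t.2.2 == 3) <;>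
      cases hs : (pvTriples upd).reverse.find? pvIsScore <;> simp
  | some tb =>
    cases hp : (pvTriples upd).reverse.find? (fun t => !pvIsScore t && t.2.2 == 3) with
    | none => cases hs : (pvTriples upd).reverse.find? pvIsScore <;> simp
    | some tp =>
      cases hs : (pvTriples upd).reverse.find? pvIsScore <;>
        · simp only [Option.map_some, Option.getD_some]
          rcases lt_trichotomy tb.1 tp.1 with h | h | h
          · simp [h, h.ne, asymm h]
          · simp [h]
          · simp [h, h.ne', asymm h]
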